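-- pv_equiv track=rewrite | github.com/avras/bp-ed25519 | python/verify_point_addition.py | cubic_term_subscripts
-- ===== SOURCE A (Python) =====
-- def cubic_term_subscripts(num_limbs):
--     max_limb_degree_in_cubic = 3*(num_limbs-1)
--     subscript_sets = []
--     for i in range(max_limb_degree_in_cubic+1):
--         subscript_sets.append(set())
--
--     for i in range(num_limbs):
--         for j in range(num_limbs):
--             for k in range(num_limbs):
--                 subscript_sets[i+j+k].add((i,j,k))
--
--     return subscript_sets
-- ===== SOURCE B (Python) =====
-- def cubic_term_subscripts(num_limbs):
--     # Bucket-first formulation: fix the target sum s and derive k = s - i - j,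
--     # instead of A's three free loops plus an indexed mutation of the bucket list.
--     return [{(i, j, s - i - j)
--              for i in range(num_limbs)
--              for j in range(num_limbs)
--              if 0 <= s - i - j < num_limbs}
--             for s in range(3*(num_limbs-1)+1)]
-- ===== Notes on version B (the rewrite author's own statement) =====
-- stated objective: alternative
-- what changed: B builds each bucket directly by a set comprehension that fixes the target sum s and derives the third index k = s - i - j with a bounds check, instead of A's three nested free loops mutating a pre-built list of empty sets at index i+j+k.
import Mathlib
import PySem

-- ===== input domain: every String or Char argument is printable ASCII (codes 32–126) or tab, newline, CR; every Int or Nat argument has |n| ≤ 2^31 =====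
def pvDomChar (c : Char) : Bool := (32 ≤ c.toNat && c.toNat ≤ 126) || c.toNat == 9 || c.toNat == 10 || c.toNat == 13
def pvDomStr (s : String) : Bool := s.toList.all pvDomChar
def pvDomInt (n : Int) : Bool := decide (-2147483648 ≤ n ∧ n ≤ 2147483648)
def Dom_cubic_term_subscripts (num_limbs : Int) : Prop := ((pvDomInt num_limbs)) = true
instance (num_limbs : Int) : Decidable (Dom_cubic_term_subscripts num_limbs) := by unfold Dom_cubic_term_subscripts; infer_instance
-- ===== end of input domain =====

-- B groups the same triples by their sum with a bucket-first set comprehension (k derived as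
-- s-i-j) instead of A's three free loops mutating an indexed list of sets; same cost, clearer.

-- ===== PORT A =====
-- Literal port of A. The index i+j+k is always nonnegative and within the list, so the total
-- forms pyGetD/pySetD are exact here (Python would only raise on an out-of-range index).
def cubic_term_subscripts (num_limbs : Int) : List (List (Int × Int × Int)) :=
  let max_limb_degree_in_cubic := 3*(num_limbs-1)
  let subscript_sets : List (List (Int × Int × Int)) :=
    (PySem.List.pyRange 0 (max_limb_degree_in_cubic+1) 1).foldl
      (fun acc _ => acc ++ [PySem.Set.empty]) []
  (PySem.List.pyRange 0 num_limbs 1).foldl (fun a1 i =>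
    (PySem.List.pyRange 0 num_limbs 1).foldl (fun a2 j =>
      (PySem.List.pyRange 0 num_limbs 1).foldl (fun a3 k =>
        PySem.List.pySetD a3 (i+j+k)
          (PySem.Set.add (PySem.List.pyGetD a3 (i+j+k) []) (i,j,k))) a2) a1) subscript_sets

-- ===== PORT B =====
def cubic_term_subscripts_alt (num_limbs : Int) : List (List (Int × Int × Int)) :=
  (PySem.List.pyRange 0 (3*(num_limbs-1)+1) 1).map (fun s =>
    (PySem.List.pyRange 0 num_limbs 1).foldl (fun acc i =>
      (PySem.List.pyRange 0 num_limbs 1).foldl (fun acc2 j =>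
        if 0 ≤ s - i - j ∧ s - i - j < num_limbs then PySem.Set.add acc2 (i, j, s - i - j)
        else acc2) acc) PySem.Set.empty)

-- ===== PRECONDITION & SPEC =====
def Spec_cubic_term_subscripts (num_limbs : Int) (out : List (List (Int × Int × Int))) : Prop := out = cubic_term_subscripts_alt num_limbs
instance (num_limbs : Int) (out : List (List (Int × Int × Int))) : Decidable (Spec_cubic_term_subscripts num_limbs out) := by unfold Spec_cubic_term_subscripts; infer_instance

-- ===== CLAIM (what is proved, stated in full; the proofs are below) =====
def Claim_equal_cubic_term_subscripts : Prop := ∀ (num_limbs : Int), Dom_cubic_term_subscripts num_limbs → Spec_cubic_term_subscripts num_limbs (cubic_term_subscripts num_limbs)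

-- ===== LEMMAS AND PROOFS =====

-- the sum of a triple's components
def pvTsum (t : Int × Int × Int) : Int := t.1 + t.2.1 + t.2.2

-- A's loop body, as a function of the accumulator and the triple
def pvUpd (acc : List (List (Int × Int × Int))) (t : Int × Int × Int) :
    List (List (Int × Int × Int)) :=
  PySem.List.pySetD acc (pvTsum t)
    (PySem.Set.add (PySem.List.pyGetD acc (pvTsum t) []) t)

-- all triples (i,j,k) with components in range(n), in A's iteration order
def pvTriples (n : Int) : List (Int × Int × Int) :=
  (PySem.List.pyRange 0 n 1).flatMap (fun i =>
    (PySem.List.pyRange 0 n 1).flatMap (fun j =>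
      (PySem.List.pyRange 0 n 1).map (fun k => (i, j, k))))

-- the triples of sum s, in B's iteration order
def pvTrip (n s : Int) : List (Int × Int × Int) :=
  (PySem.List.pyRange 0 n 1).flatMap (fun i =>
    (PySem.List.pyRange 0 n 1).flatMap (fun j =>
      if 0 ≤ s - i - j ∧ s - i - j < n then [(i, j, s - i - j)] else []))

theorem ite_fold (p : Prop) [Decidable p] (v : Int × Int × Int) (a : List (Int × Int × Int)) :
    (if p then [v] else []).foldl PySem.Set.add a = if p then PySem.Set.add a v else a := by
  split <;> simp

theorem pvA_flatten (n : Int) :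
    cubic_term_subscripts n =
      (pvTriples n).foldl pvUpd
        (List.replicate (3*(n-1)+1).toNat ([] : List (Int × Int × Int))) := by
  rw [cubic_term_subscripts, pvTriples]
  simp only [List.foldl_flatMap, List.foldl_map]
  have hinit : (PySem.List.pyRange 0 (3*(n-1)+1) 1).foldl
      (fun acc _ => acc ++ [PySem.Set.empty]) [] =
      List.replicate (3*(n-1)+1).toNat ([] : List (Int × Int × Int)) := by
    rw [PySem.List.foldl_append_singleton_eq_map]
    simp [PySem.Set.empty, PySem.List.length_pyRange_one]
  rw [hinit]
  rfl

theorem pvB_flatten (n : Int) :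
    cubic_term_subscripts_alt n =
      (PySem.List.pyRange 0 (3*(n-1)+1) 1).map (fun s =>
        (pvTrip n s).foldl PySem.Set.add []) := by
  rw [cubic_term_subscripts_alt]
  apply List.map_congr_left
  intro s _
  rw [pvTrip]
  simp only [List.foldl_flatMap, ite_fold]
  rfl

-- Set.add-fold of a duplicate-free, disjoint list is append
theorem pvFoldl_add (ts : List (Int × Int × Int)) :
    ∀ acc : List (Int × Int × Int), ts.Nodup → (∀ t ∈ ts, t ∉ acc) →
      ts.foldl PySem.Set.add acc = acc ++ ts := by
  induction ts with
  | nil => simp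
  | cons t rest ih =>
    intro acc hnd hdisj
    simp at hnd
    have hadd : PySem.Set.add acc t = acc ++ [t] := by
      simp [PySem.Set.add, PySem.Set.contains, hdisj t (by simp)]
    rw [List.foldl_cons, hadd, ih _ hnd.2]
    · simp
    · intro t' ht'
      simp
      exact ⟨hdisj t' (by simp [ht']), fun h => hnd.1 (h ▸ ht')⟩

-- flatMap is duplicate-free when a "tag" function recovers the outer element
theorem pvNodup_flatMap {α β : Type} (xs : List α) (g : α → List β) (τ : β → α)
    (hx : xs.Nodup) (htag : ∀ a, ∀ b ∈ g a, τ b = a) (hg : ∀ a, (g a).Nodup) :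
    (xs.flatMap g).Nodup := by
  induction xs with
  | nil => simp
  | cons a rest ih =>
    simp at hx
    rw [List.flatMap_cons]
    refine List.Nodup.append (hg a) (ih hx.2) ?_
    intro b hb hb'
    rcases List.mem_flatMap.mp hb' with ⟨a', ha', hba'⟩
    have h1 := htag a b hb
    have h2 := htag a' b hba'
    have haa : a = a' := by rw [← h1, h2]
    exact hx.1 (haa ▸ ha')

theorem pvNodup_trip (n s : Int) : (pvTrip n s).Nodup := by
  rw [pvTrip]
  apply pvNodup_flatMap _ _ (fun t => t.1) (PySem.List.nodup_pyRange_one 0 n)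
  · intro i t ht
    rcases List.mem_flatMap.mp ht with ⟨j, _, htj⟩
    split at htj <;> simp_all
  · intro i
    apply pvNodup_flatMap _ _ (fun t => t.2.1) (PySem.List.nodup_pyRange_one 0 n)
    · intro j t ht
      split at ht <;> simp_all
    · intro j
      split <;> simp

theorem pvNodup_triples (n : Int) : (pvTriples n).Nodup := by
  rw [pvTriples]
  apply pvNodup_flatMap _ _ (fun t => t.1) (PySem.List.nodup_pyRange_one 0 n)
  · intro i t ht
    rcases List.mem_flatMap.mp ht with ⟨j, _, htj⟩
    rcases List.mem_map.mp htj with ⟨k, _, rfl⟩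
    rfl
  · intro i
    apply pvNodup_flatMap _ _ (fun t => t.2.1) (PySem.List.nodup_pyRange_one 0 n)
    · intro j t ht
      rcases List.mem_map.mp ht with ⟨k, _, rfl⟩
      rfl
    · intro j
      exact (PySem.List.nodup_pyRange_one 0 n).map (fun a b h => by simpa using h)

-- nodup filter-to-singleton
theorem pvFilter_nodup (l : List Int) (v : Int) (h : l.Nodup) :
    l.filter (fun x => x = v) = if v ∈ l then [v] else [] := by
  split_ifs with hm
  · induction l with
    | nil => simp at hm
    | cons a t ih =>
      simp at h hm
      by_cases hv : a = v
      · subst hv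
        have : t.filter (fun x => x = a) = [] := by
          simp [List.filter_eq_nil_iff]; intro x hx; rintro rfl; exact h.1 hx
        simp [this]
      · rcases hm with rfl | hm
        · exact absurd rfl hv
        · simp [hv, ih h.2 hm]
  · simp [List.filter_eq_nil_iff]; intro a ha; rintro rfl; exact hm ha

-- the triples of sum s are exactly the filter of all triples, in the same order
theorem pvFilter_triples (n s : Int) :
    (pvTriples n).filter (fun t => pvTsum t = s) = pvTrip n s := by
  rw [pvTriples, pvTrip]
  simp only [List.filter_flatMap]
  apply List.flatMap_congr
  intro i _
  apply List.flatMap_congr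
  intro j _
  rw [List.filter_map]
  have hc : ((PySem.List.pyRange 0 n 1).filter (fun k => pvTsum (i, j, k) = s)) =
      ((PySem.List.pyRange 0 n 1).filter (fun k => k = s - i - j)) := by
    apply List.filter_congr
    intro k _
    simp [pvTsum]
    constructor <;> (intro h; omega)
  rw [Function.comp_def, hc, pvFilter_nodup _ _ (PySem.List.nodup_pyRange_one 0 n)]
  by_cases hm : 0 ≤ s - i - j ∧ s - i - j < n
  · rw [if_pos ((PySem.List.mem_pyRange_one).mpr hm), if_pos hm]
    simp
  · rw [if_neg (fun h => hm ((PySem.List.mem_pyRange_one).mp h)), if_neg hm]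
    simp


-- A's fold invariant
theorem pvFoldl_upd (ts : List (Int × Int × Int)) :
    ∀ acc : List (List (Int × Int × Int)),
      (∀ t ∈ ts, 0 ≤ pvTsum t ∧ (pvTsum t).toNat < acc.length) →
      (∀ t ∈ ts, t ∉ acc.getD (pvTsum t).toNat []) → ts.Nodup →
      (ts.foldl pvUpd acc).length = acc.length ∧
      ∀ u : Nat, (ts.foldl pvUpd acc).getD u [] =
        acc.getD u [] ++ ts.filter (fun t => pvTsum t = (u : Int)) := by
  induction ts with
  | nil => intro acc _ _ _; simp
  | cons t rest ih =>
    intro acc hb hd hnd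
    simp only [List.nodup_cons] at hnd
    obtain ⟨hs0, hslt⟩ := hb t (by simp)
    have hupd : pvUpd acc t = acc.set (pvTsum t).toNat
        (acc.getD (pvTsum t).toNat [] ++ [t]) := by
      rw [pvUpd, PySem.List.pySetD_of_nonneg _ _ hs0,
          PySem.List.pyGetD_of_nonneg _ _ hs0]
      congr 1
      have hnm : t ∉ acc.getD (pvTsum t).toNat [] := hd t (by simp)
      rw [List.getD_eq_getElem?_getD] at hnm
      simp [PySem.Set.add, PySem.Set.contains, hnm, List.getD_eq_getElem?_getD]
    have hget : ∀ u : Nat, (pvUpd acc t).getD u [] =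
        if u = (pvTsum t).toNat then acc.getD u [] ++ [t] else acc.getD u [] := by
      intro u
      rw [hupd]
      by_cases hu : u = (pvTsum t).toNat
      · subst hu
        simp [List.getD_eq_getElem?_getD, hslt]
      · simp [List.getD_eq_getElem?_getD, Ne.symm hu, hu]
    have hlen : (pvUpd acc t).length = acc.length := by rw [hupd]; simp
    have ihres := ih (pvUpd acc t)
      (fun t' ht' => by rw [hlen]; exact hb t' (by simp [ht']))
      (fun t' ht' => by
        rw [hget]
        split_ifs with he
        · rw [he]
          intro hmem
          rcases List.mem_append.mp hmem with h | h
          · exact hd t' (by simp [ht']) (he ▸ h)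
          · simp at h; exact hnd.1 (h ▸ ht')
        · exact hd t' (by simp [ht']))
      hnd.2
    refine ⟨by rw [List.foldl_cons, ihres.1, hlen], ?_⟩
    intro u
    rw [List.foldl_cons, ihres.2 u, hget u, List.filter_cons]
    by_cases hc : pvTsum t = (u : Int)
    · have hu : u = (pvTsum t).toNat := by omega
      rw [if_pos hu, if_pos (by simp [hc])]
      simp
    · have hu : ¬ (u = (pvTsum t).toNat) := by omega
      rw [if_neg hu, if_neg (by simp [hc])]

-- membership bounds for pvTriples
theorem pvMem_triples (n : Int) (t : Int × Int × Int) (h : t ∈ pvTriples n) :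
    0 ≤ t.1 ∧ t.1 < n ∧ 0 ≤ t.2.1 ∧ t.2.1 < n ∧ 0 ≤ t.2.2 ∧ t.2.2 < n := by
  rw [pvTriples] at h
  rcases List.mem_flatMap.mp h with ⟨i, hi, h2⟩
  rcases List.mem_flatMap.mp h2 with ⟨j, hj, h3⟩
  rcases List.mem_map.mp h3 with ⟨k, hk, rfl⟩
  rw [PySem.List.mem_pyRange_one] at hi hj hk
  exact ⟨hi.1, hi.2, hj.1, hj.2, hk.1, hk.2⟩

theorem pvGetD_replicate (m u : Nat) :
    (List.replicate m ([] : List (Int × Int × Int))).getD u [] = [] := by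
  simp [List.getD_eq_getElem?_getD, List.getElem?_replicate]
  split <;> simp

-- ===== VERDICT (by name: the statement is the Claim_ definition above) =====
theorem cubic_term_subscripts_spec : Claim_equal_cubic_term_subscripts := by
  intro n _
  unfold Spec_cubic_term_subscripts
  rw [pvA_flatten, pvB_flatten]
  have hmain := pvFoldl_upd (pvTriples n)
    (List.replicate (3*(n-1)+1).toNat ([] : List (Int × Int × Int)))
    (fun t ht => by
      obtain ⟨h1, h2, h3, h4, h5, h6⟩ := pvMem_triples n t ht
      rw [List.length_replicate]
      unfold pvTsum
      omega)
    (fun t ht => by rw [pvGetD_replicate]; simp)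
    (pvNodup_triples n)
  have hB : ∀ s : Int, (pvTrip n s).foldl PySem.Set.add [] = pvTrip n s := by
    intro s
    rw [pvFoldl_add _ _ (pvNodup_trip n s) (by simp)]
    simp
  apply List.ext_getElem
  · rw [hmain.1, List.length_replicate, List.length_map,
        PySem.List.length_pyRange_one]
    omega
  · intro u hu1 hu2
    have hA : (List.foldl pvUpd (List.replicate (3*(n-1)+1).toNat
        ([] : List (Int × Int × Int))) (pvTriples n)).getD u [] = pvTrip n (u : Int) := by
      rw [hmain.2 u, pvGetD_replicate, pvFilter_triples]
      simp
    rw [← List.getD_eq_getElem _ [] hu1, hA, List.getElem_map,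
        PySem.List.getElem_pyRange_one, hB]
    norm_num
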